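-- pv_equiv track=rewrite | github.com/Waseem0912-coder/odyssey | src/odyssey_dpo_generator.py | create_synthetic_examples
-- ===== SOURCE A (Python) =====
-- from typing import Dict, List, Tuple, Optional, Union
--
-- def format_action_string(
--     action_type: str,
--     coords: Optional[Tuple[int, int]] = None,
--     text: Optional[str] = None,
-- ) -> str:
--     """
--     Formats action into string format matching Odyssey's decoded action format.
--     Maintains normalized [0, 1000] coordinate system.
--
--     Args:
--         action_type: One of CLICK, TYPE, SCROLL, LONG_PRESS, COMPLETE, INCOMPLETE
--         coords: (x, y) tuple in [0, 1000] range
--         text: Text string for TYPE actions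
--
--     Returns:
--         Formatted action string
--     """
--     if action_type == "CLICK":
--         if coords:
--             return f"CLICK: ({coords[0]}, {coords[1]})"
--         return "CLICK: (0, 0)"
--     elif action_type == "LONG_PRESS":
--         if coords:
--             return f"LONG_PRESS: ({coords[0]}, {coords[1]})"
--         return "LONG_PRESS: (0, 0)"
--     elif action_type == "TYPE":
--         if text:
--             return f'TYPE: "{text}"'
--         return 'TYPE: ""'
--     elif action_type == "SCROLL":
--         if coords:
--             return f"SCROLL: ({coords[0]}, {coords[1]})"
--         return "SCROLL: (0, 0)"
--     elif action_type == "COMPLETE":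
--         return "COMPLETE"
--     elif action_type == "INCOMPLETE":
--         return "INCOMPLETE"
--     else:
--         return "STOP"
--
-- def create_synthetic_examples(n_examples: int) -> List[Dict]:
--     """Create synthetic examples for testing when HF data unavailable."""
--     examples = []
--
--     actions = [
--         {"type": "CLICK", "x": 250, "y": 400},
--         {"type": "CLICK", "x": 500, "y": 600},
--         {"type": "TYPE", "text": "search query"},
--         {"type": "CLICK", "x": 100, "y": 200},
--         {"type": "SCROLL", "x": 500, "y": 500},
--         {"type": "LONG_PRESS", "x": 300, "y": 350},
--     ]
--
--     instructions = [
--         "Open the Settings app.",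
--         "Type 'hello' in the search bar.",
--         "Tap on the home button.",
--         "Scroll down to see more options.",
--         "Long press to open context menu.",
--         "Find and click the search icon.",
--     ]
--
--     for i in range(n_examples):
--         action = actions[i % len(actions)]
--         instruction = instructions[i % len(instructions)]
--
--         example = {
--             "conversations": [
--                 {
--                     "from": "user",
--                     "value": f"<image>\nUser: {instruction}\nModel:"
--                 },
--                 {
--                     "from": "assistant",
--                     "value": format_action_string(
--                         action["type"],
--                         coords=(action.get("x"), action.get("y")) if "x" in action else None,
--                         text=action.get("text")
--                     )
--                 }
--             ]
--         }
--         examples.append(example)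
--
--     return examples
-- ===== SOURCE B (Python) =====
-- from typing import Optional, Tuple
--
-- def format_action_string(
--     action_type: str,
--     coords: Optional[Tuple[int, int]] = None,
--     text: Optional[str] = None,
-- ) -> str:
--     if action_type == "CLICK":
--         if coords:
--             return f"CLICK: ({coords[0]}, {coords[1]})"
--         return "CLICK: (0, 0)"
--     elif action_type == "LONG_PRESS":
--         if coords:
--             return f"LONG_PRESS: ({coords[0]}, {coords[1]})"
--         return "LONG_PRESS: (0, 0)"
--     elif action_type == "TYPE":
--         if text:
--             return f'TYPE: "{text}"'
--         return 'TYPE: ""'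
--     elif action_type == "SCROLL":
--         if coords:
--             return f"SCROLL: ({coords[0]}, {coords[1]})"
--         return "SCROLL: (0, 0)"
--     elif action_type == "COMPLETE":
--         return "COMPLETE"
--     elif action_type == "INCOMPLETE":
--         return "INCOMPLETE"
--     else:
--         return "STOP"
--
-- _SPECS = [
--     ("CLICK", (250, 400), None, "Open the Settings app."),
--     ("CLICK", (500, 600), None, "Type 'hello' in the search bar."),
--     ("TYPE", None, "search query", "Tap on the home button."),
--     ("CLICK", (100, 200), None, "Scroll down to see more options."),
--     ("SCROLL", (500, 500), None, "Long press to open context menu."),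
--     ("LONG_PRESS", (300, 350), None, "Find and click the search icon."),
-- ]
--
-- def create_synthetic_examples(n_examples: int):
--     """Synthetic DPO examples: precompute the six payload pairs once, then
--     materialize whole 6-cycles plus a partial cycle (divmod)."""
--     if n_examples <= 0:
--         return []
--     table = [
--         (f"<image>\nUser: {instr}\nModel:", format_action_string(t, coords=c, text=txt))
--         for (t, c, txt, instr) in _SPECS
--     ]
--     q, r = divmod(n_examples, 6)
--     pattern = table * q + table[:r]
--     return [
--         {"conversations": [
--             {"from": "user", "value": u},
--             {"from": "assistant", "value": a},
--         ]}
--         for (u, a) in pattern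
--     ]
-- ===== Notes on version B (the rewrite author's own statement) =====
-- stated objective: alternative
-- what changed: B precomputes the six (user, assistant) payload pairs once (six format_action_string calls total) and then materializes the result as whole 6-cycles plus a partial cycle via divmod (table * q + table[:r]), instead of A's per-iteration dict indexing, f-string formatting and format_action_string call inside the range(n) loop.
import Mathlib
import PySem

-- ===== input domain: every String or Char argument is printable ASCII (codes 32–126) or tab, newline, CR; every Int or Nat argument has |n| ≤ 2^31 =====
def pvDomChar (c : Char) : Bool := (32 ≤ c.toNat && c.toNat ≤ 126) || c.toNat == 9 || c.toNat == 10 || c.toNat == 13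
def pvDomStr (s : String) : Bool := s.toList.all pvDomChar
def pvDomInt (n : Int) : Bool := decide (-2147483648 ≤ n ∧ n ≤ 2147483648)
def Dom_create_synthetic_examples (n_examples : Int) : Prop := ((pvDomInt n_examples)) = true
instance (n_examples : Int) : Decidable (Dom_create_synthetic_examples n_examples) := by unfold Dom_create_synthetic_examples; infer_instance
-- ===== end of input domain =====

-- B precomputes the six payload pairs once and materializes whole 6-cycles via divmod
-- instead of re-formatting inside every loop iteration (objective: alternative decomposition).

-- ===== PORT A =====

-- heterogeneous dict values of A's `actions` dicts (ints and strings)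
inductive ActVal where
  | i : Int → ActVal
  | s : String → ActVal
deriving DecidableEq, Repr

-- extractors for the heterogeneous lookups; exact on A's literal dicts, where
-- "x"/"y" are always ints and "type"/"text" are always strings when present
def avInt : Option ActVal → Int
  | some (.i n) => n
  | _ => 0
def avStr : Option ActVal → String
  | some (.s t) => t
  | _ => ""
def avText : Option ActVal → Option String
  | some (.s t) => some t
  | _ => none

-- literal transliteration of format_action_string; `if coords:` is truthy iff the
-- Optional tuple is present (a 2-tuple is always truthy), `if text:` iff present and non-empty
def format_action_string (action_type : String) (coords : Option (Int × Int)) (text : Option String) : String :=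
  if action_type = "CLICK" then
    match coords with
    | some (x, y) => "CLICK: (" ++ PySem.Int.toStr x ++ ", " ++ PySem.Int.toStr y ++ ")"
    | none => "CLICK: (0, 0)"
  else if action_type = "LONG_PRESS" then
    match coords with
    | some (x, y) => "LONG_PRESS: (" ++ PySem.Int.toStr x ++ ", " ++ PySem.Int.toStr y ++ ")"
    | none => "LONG_PRESS: (0, 0)"
  else if action_type = "TYPE" then
    match text with
    | some t => if t = "" then "TYPE: \"\"" else "TYPE: \"" ++ t ++ "\""
    | none => "TYPE: \"\""
  else if action_type = "SCROLL" then
    match coords with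
    | some (x, y) => "SCROLL: (" ++ PySem.Int.toStr x ++ ", " ++ PySem.Int.toStr y ++ ")"
    | none => "SCROLL: (0, 0)"
  else if action_type = "COMPLETE" then "COMPLETE"
  else if action_type = "INCOMPLETE" then "INCOMPLETE"
  else "STOP"

def pyActions : List (PySem.Dict String ActVal) :=
  [ PySem.Dict.ofList [("type", .s "CLICK"), ("x", .i 250), ("y", .i 400)],
    PySem.Dict.ofList [("type", .s "CLICK"), ("x", .i 500), ("y", .i 600)],
    PySem.Dict.ofList [("type", .s "TYPE"), ("text", .s "search query")],
    PySem.Dict.ofList [("type", .s "CLICK"), ("x", .i 100), ("y", .i 200)],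
    PySem.Dict.ofList [("type", .s "SCROLL"), ("x", .i 500), ("y", .i 500)],
    PySem.Dict.ofList [("type", .s "LONG_PRESS"), ("x", .i 300), ("y", .i 350)] ]

def pyInstructions : List String :=
  [ "Open the Settings app.",
    "Type 'hello' in the search bar.",
    "Tap on the home button.",
    "Scroll down to see more options.",
    "Long press to open context menu.",
    "Find and click the search icon." ]

-- one loop iteration's `example`; indices i % len(...) are always in range (0 ≤ i in
-- range(n), 0 ≤ i % 6 < 6), so pyGetD with a dummy default is exact here
def aExample (i : Int) : List (String × List (List (String × String))) :=
  let action := PySem.List.pyGetD pyActions (PySem.Int.mod i (PySem.List.len pyActions)) PySem.Dict.empty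
  let instruction := PySem.List.pyGetD pyInstructions (PySem.Int.mod i (PySem.List.len pyInstructions)) ""
  -- in A's literal dicts "x" present implies "y" present with an int value, so the coords tuple is exact
  let coords := if action.contains "x" then some (avInt (action.get? "x"), avInt (action.get? "y")) else none
  [("conversations",
    [ [("from", "user"), ("value", "<image>\nUser: " ++ instruction ++ "\nModel:")],
      [("from", "assistant"),
       ("value", format_action_string (avStr (action.get? "type")) coords (avText (action.get? "text")))] ])]

def create_synthetic_examples (n_examples : Int) : List (List (String × List (List (String × String)))) :=
  (PySem.List.pyRange 0 n_examples 1).foldl (fun examples i => examples ++ [aExample i]) []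

-- ===== PORT B =====

-- the six (type, coords, text, instruction) specs of Source B
def altSpecs : List (String × Option (Int × Int) × Option String × String) :=
  [ ("CLICK", some (250, 400), none, "Open the Settings app."),
    ("CLICK", some (500, 600), none, "Type 'hello' in the search bar."),
    ("TYPE", none, some "search query", "Tap on the home button."),
    ("CLICK", some (100, 200), none, "Scroll down to see more options."),
    ("SCROLL", some (500, 500), none, "Long press to open context menu."),
    ("LONG_PRESS", some (300, 350), none, "Find and click the search icon.") ]

def create_synthetic_examples_alt (n_examples : Int) : List (List (String × List (List (String × String)))) :=
  if n_examples ≤ 0 then []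
  else
    let table := altSpecs.map (fun (t, c, txt, instr) =>
      ("<image>\nUser: " ++ instr ++ "\nModel:", format_action_string t c txt))
    let q := PySem.Int.floordiv n_examples 6
    let r := PySem.Int.mod n_examples 6
    let pattern := (List.replicate q.toNat table).flatten ++ table.take r.toNat
    pattern.map (fun (u, a) =>
      [("conversations", [ [("from", "user"), ("value", u)], [("from", "assistant"), ("value", a)] ])])

-- ===== PRECONDITION & SPEC =====
def Spec_create_synthetic_examples (n_examples : Int) (out : List (List (String × List (List (String × String))))) : Prop := out = create_synthetic_examples_alt n_examples
instance (n_examples : Int) (out : List (List (String × List (List (String × String))))) : Decidable (Spec_create_synthetic_examples n_examples out) := by unfold Spec_create_synthetic_examples; infer_instance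

-- ===== CLAIM (what is proved, stated in full; the proofs are below) =====
def Claim_equal_create_synthetic_examples : Prop := ∀ (n_examples : Int), Dom_create_synthetic_examples n_examples → Spec_create_synthetic_examples n_examples (create_synthetic_examples n_examples)

-- ===== LEMMAS AND PROOFS =====

-- the six finished example values, as B's table produces them
def baseExamples : List (List (String × List (List (String × String)))) :=
  (altSpecs.map (fun (t, c, txt, instr) =>
    ("<image>\nUser: " ++ instr ++ "\nModel:", format_action_string t c txt))).map
    (fun (u, a) =>
      [("conversations", [ [("from", "user"), ("value", u)], [("from", "assistant"), ("value", a)] ])])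

lemma aExample_mod_six (k : Nat) : aExample (k : Int) = aExample ((k % 6 : Nat) : Int) := by
  have h6 : PySem.List.len pyActions = 6 := by decide
  have h6' : PySem.List.len pyInstructions = 6 := by decide
  have hm : PySem.Int.mod (k : Int) 6 = PySem.Int.mod ((k % 6 : Nat) : Int) 6 := by
    rw [show ((6:Int) = ((6:Nat):Int)) from rfl, PySem.Int.mod_natCast, PySem.Int.mod_natCast]
    norm_cast
    omega
  simp only [aExample, h6, h6', hm]

lemma aExample_base (j : Fin 6) : aExample ((j : Nat) : Int) = baseExamples.getD (j : Nat) [] := by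
  fin_cases j <;> decide

lemma aExample_eq_base (k : Nat) :
    aExample (k : Int) = baseExamples.getD (k % 6) [] := by
  rw [aExample_mod_six]
  exact aExample_base ⟨k % 6, by omega⟩

lemma cycle_eq {X : Type} (L : List X) (d : X) (hL : L.length = 6) (m : Nat) :
    (List.range m).map (fun k => L.getD (k % 6) d) =
      (List.replicate (m / 6) L).flatten ++ L.take (m % 6) := by
  induction m with
  | zero => simp
  | succ m ih =>
    rw [List.range_succ, List.map_append, ih, List.map_singleton]
    have hr : m % 6 < 6 := by omega
    have hgd : L.getD (m % 6) d = L[m % 6] := List.getD_eq_getElem L d (by omega)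
    have htake : L.take (m % 6 + 1) = L.take (m % 6) ++ [L[m % 6]] := by
      rw [List.take_add_one, List.getElem?_eq_getElem (by omega)]
      rfl
    by_cases h5 : m % 6 = 5
    · have h1 : (m + 1) / 6 = m / 6 + 1 := by omega
      have h2 : (m + 1) % 6 = 0 := by omega
      have hL6 : L.take 6 = L := by rw [← hL]; exact List.take_length
      rw [h1, h2, List.replicate_succ', List.flatten_append, List.flatten_singleton,
        List.take_zero, List.append_nil, List.append_assoc, hgd]
      congr 1
      rw [← htake, show m % 6 + 1 = 6 by omega, hL6]
    · have h1 : (m + 1) / 6 = m / 6 := by omega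
      have h2 : (m + 1) % 6 = m % 6 + 1 := by omega
      rw [h1, h2, htake, hgd, List.append_assoc]

-- ===== VERDICT (by name: the statement is the Claim_ definition above) =====
theorem create_synthetic_examples_spec : Claim_equal_create_synthetic_examples := by
  intro n _
  unfold Spec_create_synthetic_examples create_synthetic_examples create_synthetic_examples_alt
  by_cases hn : n ≤ 0
  · rw [PySem.List.pyRange_one_eq_nil (by omega), if_pos hn]
    rfl
  · rw [if_neg hn]
    rw [not_le] at hn
    obtain ⟨m, rfl⟩ : ∃ m : Nat, n = (m : Int) := ⟨n.toNat, (Int.toNat_of_nonneg (by omega)).symm⟩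
    have hq : (PySem.Int.floordiv (m : Int) 6).toNat = m / 6 := by
      rw [show ((6:Int) = ((6:Nat):Int)) from rfl, PySem.Int.floordiv_natCast]
      exact Int.toNat_natCast _
    have hr : (PySem.Int.mod (m : Int) 6).toNat = m % 6 := by
      rw [show ((6:Int) = ((6:Nat):Int)) from rfl, PySem.Int.mod_natCast]
      exact Int.toNat_natCast _
    rw [PySem.List.foldl_append_singleton_eq_map, PySem.List.pyRange_one]
    simp only [Int.sub_zero, Int.toNat_natCast, List.map_map, Function.comp_def, zero_add]
    rw [List.map_congr_left (fun k _ => aExample_eq_base k), cycle_eq baseExamples ([]) (by decide) m]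
    rw [hq, hr, List.map_append, List.map_flatten, List.map_replicate, List.map_take]
    rfl
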